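-- pv_equiv track=rewrite | github.com/ckadelka/COVID19-CDC-allocation-evaluation | fitfunc_v39bbb.py | get_i1_to_i8
-- ===== SOURCE A (Python) =====
-- def get_i1_to_i8(ID):
--     def get_two_indices(dummy):
--         counter = -1
--         for index_smaller in range(4):
--             for index_larger in range(index_smaller,4):
--                 counter+=1
--                 if counter==dummy:
--                     break
--             if counter==dummy:
--                 break
--         return (index_larger,index_smaller)
--
--     indices = [0]*8
--     for i in range(4):
--         ID = ID % (10**(4-i))
--         dummy = int(ID / 10**(3-i))
--         (indices[2*i],indices[2*i+1]) = get_two_indices(dummy)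
--     return indices
-- ===== SOURCE B (Python) =====
-- # Precomputed (larger, smaller) pair table replaces A's nested counting scan;
-- # each digit indexes the table directly.
-- _PAIRS = [(0, 0), (1, 0), (2, 0), (3, 0),
--           (1, 1), (2, 1), (3, 1),
--           (2, 2), (3, 2), (3, 3)]
--
-- def get_i1_to_i8(ID):
--     r = ID % 10000
--     out = []
--     for d in (r // 1000, r // 100 % 10, r // 10 % 10, r % 10):
--         out.extend(_PAIRS[d])
--     return out
-- ===== Notes on version B (the rewrite author's own statement) =====
-- stated objective: simpler
-- what changed: B extracts the four digits arithmetically in one expression and maps each digit to its (larger, smaller) pair by direct indexing into a small precomputed table, eliminating A's per-digit nested counting scan with breaks.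
import Mathlib
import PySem

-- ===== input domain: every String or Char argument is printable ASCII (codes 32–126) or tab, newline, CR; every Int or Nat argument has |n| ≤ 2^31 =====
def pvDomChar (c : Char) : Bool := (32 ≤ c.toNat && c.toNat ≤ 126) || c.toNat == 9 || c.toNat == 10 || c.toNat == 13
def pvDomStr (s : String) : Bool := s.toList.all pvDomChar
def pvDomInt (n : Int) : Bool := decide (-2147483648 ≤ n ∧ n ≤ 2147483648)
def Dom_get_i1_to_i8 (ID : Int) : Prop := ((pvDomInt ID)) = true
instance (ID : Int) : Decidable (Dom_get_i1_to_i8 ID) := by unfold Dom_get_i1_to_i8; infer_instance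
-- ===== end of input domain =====

-- B replaces A's nested counting scan with a precomputed (larger, smaller) pair table
-- indexed directly by each extracted digit (objective: simpler).

-- ===== PORT A =====
-- inner 'for index_larger in range(index_smaller,4)': state (counter, index_larger);
-- returns the state at break (counter == dummy) or at loop end.
def gtiInner (dummy : Int) (counter : Int) (il : Int) : List Int → Int × Int
  | [] => (counter, il)
  | l :: rest =>
    let c := counter + 1
    if c = dummy then (c, l) else gtiInner dummy c l rest

-- outer 'for index_smaller in range(4)' with the post-loop 'if counter==dummy: break'.
-- The initial il/ismall values are placeholders: Python leaves the variables unassigned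
-- until the first inner iteration, which always happens (range(s,4) nonempty for s in range(4)).
def gtiOuter (dummy : Int) (counter : Int) (il : Int) (ismall : Int) : List Int → Int × Int
  | [] => (il, ismall)
  | s :: rest =>
    let p := gtiInner dummy counter il (PySem.List.pyRange s 4 1)
    if p.1 = dummy then (p.2, s) else gtiOuter dummy p.1 p.2 s rest

def get_two_indices (dummy : Int) : Int × Int :=
  gtiOuter dummy (-1) 0 0 (PySem.List.pyRange 0 4 1)

def get_i1_to_i8 (ID : Int) : List Int :=
  -- 'int(ID / 10**(3-i))' is float division in Python; after 'ID = ID % 10**(4-i)'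
  -- we have 0 ≤ ID < 10**(4-i) < 2**53, where it is exactly floor division.
  let step := fun (st : Int × List Int) (i : Int) =>
    let id' := PySem.Int.mod st.1 (10 ^ (4 - i).toNat)
    let dummy := PySem.Int.floordiv id' (10 ^ (3 - i).toNat)
    let p := get_two_indices dummy
    (id', (st.2.set (2 * i).toNat p.1).set (2 * i + 1).toNat p.2)
  ((PySem.List.pyRange 0 4 1).foldl step (ID, List.replicate 8 0)).2

-- ===== PORT B =====
def pairsB : List (Int × Int) :=
  [(0, 0), (1, 0), (2, 0), (3, 0), (1, 1), (2, 1), (3, 1), (2, 2), (3, 2), (3, 3)]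

-- out.extend(_PAIRS[d]); the digit d is always in [0, 9], so the none branch (IndexError)
-- is unreachable.
def pairAt (d : Int) : List Int :=
  match PySem.List.pyGet? pairsB d with
  | some p => [p.1, p.2]
  | none => []

def get_i1_to_i8_alt (ID : Int) : List Int :=
  let r := PySem.Int.mod ID 10000
  let ds : List Int :=
    [PySem.Int.floordiv r 1000,
     PySem.Int.mod (PySem.Int.floordiv r 100) 10,
     PySem.Int.mod (PySem.Int.floordiv r 10) 10,
     PySem.Int.mod r 10]
  ds.foldl (fun out d => out ++ pairAt d) []

-- ===== PRECONDITION & SPEC =====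
def Spec_get_i1_to_i8 (ID : Int) (out : List Int) : Prop := out = get_i1_to_i8_alt ID
instance (ID : Int) (out : List Int) : Decidable (Spec_get_i1_to_i8 ID out) := by unfold Spec_get_i1_to_i8; infer_instance

-- ===== CLAIM (what is proved, stated in full; the proofs are below) =====
def Claim_equal_get_i1_to_i8 : Prop := ∀ (ID : Int), Dom_get_i1_to_i8 ID → Spec_get_i1_to_i8 ID (get_i1_to_i8 ID)

-- ===== LEMMAS AND PROOFS =====

-- A's nested scan agrees with B's table lookup on every digit.
theorem gti_pair (d : Int) (h0 : 0 ≤ d) (h9 : d < 10) :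
    [(get_two_indices d).1, (get_two_indices d).2] = pairAt d := by
  interval_cases d <;> decide

theorem main_eq (ID : Int) : get_i1_to_i8 ID = get_i1_to_i8_alt ID := by
  have hR : PySem.List.pyRange 0 4 1 = [0, 1, 2, 3] := by decide
  simp only [get_i1_to_i8, get_i1_to_i8_alt, hR, List.foldl]
  norm_num [List.set]
  simp only [show Int.toNat 2 = 2 from rfl, show Int.toNat 3 = 3 from rfl,
    show Int.toNat 4 = 4 from rfl, show Int.toNat 5 = 5 from rfl,
    show Int.toNat 6 = 6 from rfl, show Int.toNat 7 = 7 from rfl]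
  norm_num [List.replicate, List.set]
  have d1 : ID % 1000 / 100 = ID % 10000 / 100 % 10 := by omega
  have d2 : ID % 100 / 10 = ID % 10000 / 10 % 10 := by omega
  rw [d1, d2,
    ← gti_pair (ID % 10000 / 1000) (by omega) (by omega),
    ← gti_pair (ID % 10000 / 100 % 10) (by omega) (by omega),
    ← gti_pair (ID % 10000 / 10 % 10) (by omega) (by omega),
    ← gti_pair (ID % 10) (by omega) (by omega)]
  simp

-- ===== VERDICT (by name: the statement is the Claim_ definition above) =====
theorem get_i1_to_i8_spec : Claim_equal_get_i1_to_i8 := by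
  intro ID _
  unfold Spec_get_i1_to_i8
  exact main_eq ID
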